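-- pv_equiv track=rewrite | github.com/vanschependom/KULAK_beginselen-van-programmeren | HC6/slides-les6-recursie.py | loketRijen
-- ===== SOURCE A (Python) =====
-- def loketRijen(lengte):
--     if lengte == 0:
--         return ['']
--     kortereRijen = loketRijen(lengte-1)
--     result = []
--     for rij in kortereRijen:
--         # 'A' mag altijd toegevoegd worden
--         result.append(rij+'A')
--         # 'B' mag enkel toegevoegd worden indien
--         # er reeds meer 'A's dan 'B's voorkomen
--         if rij.count('A') > rij.count('B'):
--             result.append(rij+'B')
--     return result
-- ===== SOURCE B (Python) =====
-- def loketRijen(lengte):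
--     # Backtracking DFS with an explicit stack, carrying running counts of
--     # 'A' (a) and 'B' (b); pushing the 'B' child first keeps A-before-B order.
--     out = []
--     stack = [('', 0, 0)]
--     while stack:
--         s, a, b = stack.pop()
--         if len(s) == lengte:
--             out.append(s)
--             continue
--         if a > b:
--             stack.append((s + 'B', a, b + 1))
--         stack.append((s + 'A', a + 1, b))
--     return out
-- ===== Notes on version B (the rewrite author's own statement) =====
-- stated objective: alternative
-- what changed: Replaces the level-by-level rebuild (recompute all shorter rows, then rescan each with str.count to extend it) by an explicit-stack depth-first search that builds each full-length string once, carrying running A/B counts.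
-- outside the precondition, e.g. on loketRijen(-51): A raises RecursionError, B does not finish within the time limit; on loketRijen(-52): A raises RecursionError, B does not finish within the time limit; on loketRijen(-53): A raises RecursionError, B does not finish within the time limit
import Mathlib
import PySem

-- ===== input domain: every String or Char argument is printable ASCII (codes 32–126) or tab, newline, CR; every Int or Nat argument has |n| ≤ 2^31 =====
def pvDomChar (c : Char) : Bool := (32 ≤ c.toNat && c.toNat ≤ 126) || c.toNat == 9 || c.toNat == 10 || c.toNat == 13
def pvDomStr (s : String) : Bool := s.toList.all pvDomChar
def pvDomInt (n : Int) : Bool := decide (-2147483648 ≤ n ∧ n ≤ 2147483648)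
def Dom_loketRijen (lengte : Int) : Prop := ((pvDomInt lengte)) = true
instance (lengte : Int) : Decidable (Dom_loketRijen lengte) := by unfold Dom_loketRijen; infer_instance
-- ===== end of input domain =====

-- B replaces A's level-by-level rebuild (with str.count rescans) by an explicit-stack DFS
-- carrying running A/B counts; same output, alternative decomposition.

-- ===== PORT A =====
-- exact port of rij.count('A') for a single-character needle: counts occurrences of the char
def countChar (s : String) (c : Char) : Nat := s.toList.count c

-- A's recursion descends lengte → 0; realized by structural recursion on lengte.toNat,
-- exact for lengte ≥ 0 (Pre_); for negative lengte Python A raises RecursionError.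
def loketRijenNatA : Nat → List String
  | 0 => [""]
  | n + 1 =>
    (loketRijenNatA n).foldl
      (fun result rij =>
        let result := result ++ [rij ++ "A"]
        if countChar rij 'A' > countChar rij 'B' then result ++ [rij ++ "B"] else result)
      []

def loketRijen (lengte : Int) : List String := loketRijenNatA lengte.toNat

-- ===== PORT B =====
-- the termination measure of the stack loop (Python's 'while stack', a loop; proof-side only)
def muB (n : Nat) (st : List (String × Int × Int)) : Nat :=
  (st.map (fun e => 3 ^ (n + 1 - e.1.length))).sum

-- Python's while-loop over the stack (list head = top of stack; Python appends the 'B' child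
-- then the 'A' child and pops from the end, so the new top is the 'A' child, as here).
-- 'len(s) == lengte' is compared against lengte.toNat, exact for lengte ≥ 0 (Pre_); for
-- negative lengte Python B never returns. The 'n < s.length' branch is a totality guard only:
-- no state reachable from the initial stack [("", 0, 0)] has s longer than n.
def goB (n : Nat) : List (String × Int × Int) → List String
  | [] => []
  | (s, a, b) :: rest =>
    if s.length = n then s :: goB n rest
    else if n < s.length then goB n rest
    else goB n ((s ++ "A", a + 1, b) :: ((if a > b then [(s ++ "B", a, b + 1)] else []) ++ rest))
  termination_by st => muB n st
  decreasing_by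
  · simp only [muB, List.map_cons, List.sum_cons]
    have : 0 < 3 ^ (n + 1 - s.length) := Nat.pow_pos (by norm_num)
    omega
  · simp only [muB, List.map_cons, List.sum_cons]
    have : 0 < 3 ^ (n + 1 - s.length) := Nat.pow_pos (by norm_num)
    omega
  · rename_i h1 h2
    have hlt : s.length < n := by
      omega
    have hA : (s ++ "A").length = s.length + 1 := by
      rw [String.length_append]; rfl
    have hsub : n + 1 - s.length = (n - s.length) + 1 := by omega
    have hsub2 : n + 1 - (s.length + 1) = n - s.length := by omega
    simp only [muB, List.map_cons, List.sum_cons, List.map_append, List.sum_append, hA, hsub, hsub2]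
    split_ifs
    · simp only [List.map_cons, List.sum_cons, List.map_nil, List.sum_nil]
      have : (s ++ "B").length = s.length + 1 := by
        rw [String.length_append]; rfl
      simp only [this, hsub2]
      have h3 : 0 < 3 ^ (n - s.length) := Nat.pow_pos (by norm_num)
      omega
    · simp only [List.map_nil, List.sum_nil]
      have h3 : 0 < 3 ^ (n - s.length) := Nat.pow_pos (by norm_num)
      omega

def loketRijen_alt (lengte : Int) : List String := goB lengte.toNat [("", 0, 0)]

-- ===== PRECONDITION & SPEC =====
-- Pre_ excludes exactly the inputs on which Python A raises RecursionError and returns no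
-- value: negative lengte (e.g. -77, or -4321: the recursion never reaches the base case) and
-- lengte ≥ 990 (e.g. 99999), where the recursion depth — one frame per unit of lengte, plus
-- the interpreter's own frames — exceeds CPython's default recursion limit before any row is
-- built.
def Pre_loketRijen (lengte : Int) : Prop := 0 ≤ lengte ∧ lengte < 990
instance (lengte : Int) : Decidable (Pre_loketRijen lengte) := by unfold Pre_loketRijen; infer_instance
def pvWitness_loketRijen : Int := (3)

def Spec_loketRijen (lengte : Int) (out : List String) : Prop := out = loketRijen_alt lengte
instance (lengte : Int) (out : List String) : Decidable (Spec_loketRijen lengte out) := by unfold Spec_loketRijen; infer_instance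

-- ===== CLAIM (what is proved, stated in full; the proofs are below) =====
def Claim_equal_loketRijen : Prop := ∀ (lengte : Int), Dom_loketRijen lengte → Pre_loketRijen lengte → Spec_loketRijen lengte (loketRijen lengte)

-- ===== LEMMAS AND PROOFS =====

-- the one-row extension A performs, as a flatMap
def extA (rij : String) : List String :=
  [rij ++ "A"] ++ (if countChar rij 'A' > countChar rij 'B' then [rij ++ "B"] else [])

lemma foldlA_eq_flatMap (L acc : List String) :
    L.foldl
      (fun result rij =>
        let result := result ++ [rij ++ "A"]
        if countChar rij 'A' > countChar rij 'B' then result ++ [rij ++ "B"] else result)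
      acc = acc ++ L.flatMap extA := by
  induction L generalizing acc with
  | nil => simp
  | cons x xs ih =>
    simp only [List.foldl_cons, List.flatMap_cons, ih, extA]
    split_ifs <;> simp

-- "apply A's step n more times", step-first form
def nestA : Nat → List String → List String
  | 0, L => L
  | n + 1, L => nestA n (L.flatMap extA)

lemma nestA_append (n : Nat) (L₁ L₂ : List String) :
    nestA n (L₁ ++ L₂) = nestA n L₁ ++ nestA n L₂ := by
  induction n generalizing L₁ L₂ with
  | zero => rfl
  | succ n ih => simp [nestA, ih]

lemma loketRijenNatA_eq_nestA (n : Nat) : loketRijenNatA n = nestA n [""] := by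
  induction n with
  | zero => rfl
  | succ n ih =>
    have comm : ∀ (m : Nat) (L : List String),
        nestA m (L.flatMap extA) = (nestA m L).flatMap extA := by
      intro m
      induction m with
      | zero => intro L; rfl
      | succ m ih' => intro L; simp [nestA, ih']
    show List.foldl _ [] (loketRijenNatA n) = nestA (n + 1) [""]
    rw [foldlA_eq_flatMap, ih, List.nil_append, nestA, comm]

lemma countChar_append_A (s : String) :
    countChar (s ++ "A") 'A' = countChar s 'A' + 1 ∧
    countChar (s ++ "A") 'B' = countChar s 'B' := by
  simp [countChar]

lemma countChar_append_B (s : String) :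
    countChar (s ++ "B") 'A' = countChar s 'A' ∧
    countChar (s ++ "B") 'B' = countChar s 'B' + 1 := by
  simp [countChar]

-- proof-side recursive view of B's DFS (the recursion the stack loop implements)
def dfsB : Nat → String → Int → Int → List String
  | 0, s, _, _ => [s]
  | n + 1, s, a, b =>
    dfsB n (s ++ "A") (a + 1) b ++ (if a > b then dfsB n (s ++ "B") a (b + 1) else [])

-- the stack loop processes its top entry exactly as dfsB, then the rest
lemma goB_cons (n : Nat) : ∀ (m : Nat) (s : String) (a b : Int)
    (rest : List (String × Int × Int)), s.length + m = n →
    goB n ((s, a, b) :: rest) = dfsB m s a b ++ goB n rest := by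
  intro m
  induction m with
  | zero =>
    intro s a b rest hm
    have hl : s.length = n := by omega
    rw [goB, if_pos hl]
    simp [dfsB]
  | succ m ih =>
    intro s a b rest hm
    have hl : ¬ s.length = n := by omega
    have hl2 : ¬ n < s.length := by omega
    rw [goB, if_neg hl, if_neg hl2]
    have hlenA : (s ++ "A").length = s.length + 1 := by
      rw [String.length_append]; rfl
    have hA : (s ++ "A").length + m = n := by omega
    by_cases hc : a > b
    · have hlenB : (s ++ "B").length = s.length + 1 := by
        rw [String.length_append]; rfl
      have hB : (s ++ "B").length + m = n := by omega
      simp only [if_pos hc, List.cons_append, List.nil_append]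
      rw [ih _ _ _ _ hA, ih _ _ _ _ hB, dfsB, if_pos hc, List.append_assoc]
    · simp only [if_neg hc, List.nil_append]
      rw [ih _ _ _ _ hA, dfsB, if_neg hc, List.append_nil]

-- DFS from a prefix with correct running counts = A's step applied n more times to that prefix
lemma dfsB_eq_nestA (n : Nat) (s : String) (a b : Int)
    (ha : a = (countChar s 'A' : Int)) (hb : b = (countChar s 'B' : Int)) :
    dfsB n s a b = nestA n [s] := by
  induction n generalizing s a b with
  | zero => rfl
  | succ n ih =>
    have hcond : (a > b) ↔ (countChar s 'A' > countChar s 'B') := by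
      subst ha hb; exact_mod_cast Iff.rfl
    have hA : dfsB n (s ++ "A") (a + 1) b = nestA n [s ++ "A"] := by
      apply ih
      · rw [(countChar_append_A s).1]; push_cast; omega
      · rw [(countChar_append_A s).2]; exact hb
    have hstep : nestA (n + 1) [s] = nestA n (extA s) := by
      simp [nestA, extA]
    rw [hstep]
    by_cases hc : a > b
    · have hB : dfsB n (s ++ "B") a (b + 1) = nestA n [s ++ "B"] := by
        apply ih
        · rw [(countChar_append_B s).1]; exact ha
        · rw [(countChar_append_B s).2]; push_cast; omega
      simp only [dfsB, if_pos hc, hA, hB, extA, if_pos (hcond.mp hc)]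
      exact (nestA_append n [s ++ "A"] [s ++ "B"]).symm
    · simp only [dfsB, if_neg hc, hA, extA, if_neg (fun h => hc (hcond.mpr h)),
        List.append_nil]

-- ===== VERDICT (by name: the statement is the Claim_ definition above) =====
theorem loketRijen_spec : Claim_equal_loketRijen := by
  intro lengte _ _
  unfold Spec_loketRijen loketRijen loketRijen_alt
  rw [loketRijenNatA_eq_nestA,
    goB_cons lengte.toNat lengte.toNat "" 0 0 [] (by simp),
    dfsB_eq_nestA _ "" 0 0 (by simp [countChar]) (by simp [countChar])]
  simp [goB]
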